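-- pv_equiv track=rewrite | github.com/ladyblueumd/resume_database_system | testing/fieldnation_data_processor.py | _categorize_client_type
-- ===== SOURCE A (Python) =====
-- def _categorize_client_type(company_name: str, work_description: str) -> str:
--     """Categorize client type based on company and work description"""
--     company_lower = company_name.lower() if company_name else ""
--     desc_lower = work_description.lower() if work_description else ""
--
--     # Client type indicators
--     if any(word in company_lower + desc_lower for word in ['hospital', 'medical', 'healthcare', 'clinic']):
--         return 'Healthcare'
--     elif any(word in company_lower + desc_lower for word in ['bank', 'financial', 'credit', 'investment']):
--         return 'Financial'
--     elif any(word in company_lower + desc_lower for word in ['retail', 'store', 'mall', 'shop', 'restaurant']):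
--         return 'Retail'
--     elif any(word in company_lower + desc_lower for word in ['government', 'federal', 'state', 'municipal']):
--         return 'Government'
--     elif any(word in company_lower + desc_lower for word in ['school', 'university', 'education', 'college']):
--         return 'Education'
--     elif any(word in company_lower + desc_lower for word in ['warehouse', 'logistics', 'distribution']):
--         return 'Logistics'
--     else:
--         return 'Enterprise'
-- ===== SOURCE B (Python) =====
-- # Text-driven scan: walk the text once; at each position test keyword prefixes
-- # and keep the minimum category rank seen; no `in` substring tests, no if/elif chain.
-- _KEYWORDS = {
--     'hospital': 0, 'medical': 0, 'healthcare': 0, 'clinic': 0,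
--     'bank': 1, 'financial': 1, 'credit': 1, 'investment': 1,
--     'retail': 2, 'store': 2, 'mall': 2, 'shop': 2, 'restaurant': 2,
--     'government': 3, 'federal': 3, 'state': 3, 'municipal': 3,
--     'school': 4, 'university': 4, 'education': 4, 'college': 4,
--     'warehouse': 5, 'logistics': 5, 'distribution': 5,
-- }
-- _CATS = ['Healthcare', 'Financial', 'Retail', 'Government', 'Education', 'Logistics']
--
--
-- def _categorize_client_type(company_name: str, work_description: str) -> str:
--     text = (company_name.lower() if company_name else "") + \
--            (work_description.lower() if work_description else "")
--     best = 6
--     for i in range(len(text)):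
--         for kw, rank in _KEYWORDS.items():
--             if rank < best and text.startswith(kw, i):
--                 best = rank
--     return _CATS[best] if best < 6 else 'Enterprise'
-- ===== Notes on version B (the rewrite author's own statement) =====
-- stated objective: alternative
-- what changed: Instead of testing each category's keywords for substring containment in order, B does a single text-driven scan: it walks the text position by position, tests keyword prefixes from a keyword->rank dictionary at each position, and keeps the minimum category rank found, indexing the category list at the end.
import Mathlib
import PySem

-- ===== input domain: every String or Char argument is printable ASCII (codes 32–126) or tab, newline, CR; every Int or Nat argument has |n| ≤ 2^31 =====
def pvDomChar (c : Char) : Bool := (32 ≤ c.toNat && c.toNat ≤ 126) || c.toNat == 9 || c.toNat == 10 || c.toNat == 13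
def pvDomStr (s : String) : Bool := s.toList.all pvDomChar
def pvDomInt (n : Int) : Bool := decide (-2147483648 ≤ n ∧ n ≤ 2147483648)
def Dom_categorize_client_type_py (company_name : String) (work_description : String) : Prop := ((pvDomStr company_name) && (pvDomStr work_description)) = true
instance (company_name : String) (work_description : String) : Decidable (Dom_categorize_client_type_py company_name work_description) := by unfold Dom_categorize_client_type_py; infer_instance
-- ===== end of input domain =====

-- B replaces A's per-category substring chain by a single text-driven scan: walk the text once, test keyword prefixes at each position, keep the minimum category rank (objective: alternative).


-- ===== PORT A =====
-- literal transliteration of A: two guarded lowerings, then an if/elif chain of `any` substring tests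
def categorize_client_type_py (company_name : String) (work_description : String) : String :=
  let company_lower : List Char :=
    if company_name ≠ "" then PySem.Chars.lower company_name.toList else []
  let desc_lower : List Char :=
    if work_description ≠ "" then PySem.Chars.lower work_description.toList else []
  if ["hospital", "medical", "healthcare", "clinic"].any
      (fun word => PySem.Chars.isIn word.toList (company_lower ++ desc_lower)) then "Healthcare"
  else if ["bank", "financial", "credit", "investment"].any
      (fun word => PySem.Chars.isIn word.toList (company_lower ++ desc_lower)) then "Financial"
  else if ["retail", "store", "mall", "shop", "restaurant"].any
      (fun word => PySem.Chars.isIn word.toList (company_lower ++ desc_lower)) then "Retail"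
  else if ["government", "federal", "state", "municipal"].any
      (fun word => PySem.Chars.isIn word.toList (company_lower ++ desc_lower)) then "Government"
  else if ["school", "university", "education", "college"].any
      (fun word => PySem.Chars.isIn word.toList (company_lower ++ desc_lower)) then "Education"
  else if ["warehouse", "logistics", "distribution"].any
      (fun word => PySem.Chars.isIn word.toList (company_lower ++ desc_lower)) then "Logistics"
  else "Enterprise"

-- ===== PORT B =====
-- B's keyword → category-rank dictionary (insertion order of Source B's _KEYWORDS) and the category list
def pvKeywords : List (List Char × Nat) :=
  [("hospital".toList, 0), ("medical".toList, 0), ("healthcare".toList, 0), ("clinic".toList, 0),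
   ("bank".toList, 1), ("financial".toList, 1), ("credit".toList, 1), ("investment".toList, 1),
   ("retail".toList, 2), ("store".toList, 2), ("mall".toList, 2), ("shop".toList, 2), ("restaurant".toList, 2),
   ("government".toList, 3), ("federal".toList, 3), ("state".toList, 3), ("municipal".toList, 3),
   ("school".toList, 4), ("university".toList, 4), ("education".toList, 4), ("college".toList, 4),
   ("warehouse".toList, 5), ("logistics".toList, 5), ("distribution".toList, 5)]

def pvCats : List String :=
  ["Healthcare", "Financial", "Retail", "Government", "Education", "Logistics"]

-- Source B's double loop: for i in range(len(text)): for kw, rank in _KEYWORDS.items(): if rank < best and text.startswith(kw, i): best = rank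
def pvBest (text : List Char) : Nat :=
  (PySem.List.pyRange 0 (text.length : Int) 1).foldl
    (fun best i =>
      pvKeywords.foldl
        (fun best kv =>
          if kv.2 < best ∧ PySem.Chars.startswith (text.drop i.toNat) kv.1 then kv.2 else best)
        best)
    6

def categorize_client_type_py_alt (company_name : String) (work_description : String) : String :=
  let text : List Char :=
    (if company_name ≠ "" then PySem.Chars.lower company_name.toList else []) ++
    (if work_description ≠ "" then PySem.Chars.lower work_description.toList else [])
  let best := pvBest text
  if best < 6 then pvCats.getD best "Enterprise" else "Enterprise"

-- ===== PRECONDITION & SPEC =====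
def Spec_categorize_client_type_py (company_name : String) (work_description : String) (out : String) : Prop := out = categorize_client_type_py_alt company_name work_description
instance (company_name : String) (work_description : String) (out : String) : Decidable (Spec_categorize_client_type_py company_name work_description out) := by unfold Spec_categorize_client_type_py; infer_instance

-- ===== CLAIM (what is proved, stated in full; the proofs are below) =====
def Claim_equal_categorize_client_type_py : Prop := ∀ (company_name : String) (work_description : String), Dom_categorize_client_type_py company_name work_description → Spec_categorize_client_type_py company_name work_description (categorize_client_type_py company_name work_description)

-- ===== LEMMAS AND PROOFS =====

-- Source B's inner loop over the keyword dict is a running minimum over the ranks of keywords matching at this position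
lemma pv_foldl_if_min (s : List Char) (ks : List (List Char × Nat)) (b : Nat) :
    ks.foldl (fun best kv => if kv.2 < best ∧ PySem.Chars.startswith s kv.1 then kv.2 else best) b
      = ((ks.filter (fun kv => PySem.Chars.startswith s kv.1)).map (fun kv => kv.2)).foldl min b := by
  induction ks generalizing b with
  | nil => rfl
  | cons x t ih =>
    simp only [List.foldl_cons, List.filter_cons]
    by_cases hp : PySem.Chars.startswith s x.1 = true
    · simp only [hp, and_true, if_true, List.map_cons, List.foldl_cons, ih]
      congr 1
      rw [Nat.min_def]; split_ifs <;> omega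
    · simp [hp, ih]

-- Source B's two nested loops compute the minimum rank over all (position, keyword) matches
lemma pvBest_eq_gen (text : List Char) (ks : List (List Char × Nat)) :
    (PySem.List.pyRange 0 (text.length : Int) 1).foldl
      (fun best i => ks.foldl
        (fun best kv => if kv.2 < best ∧ PySem.Chars.startswith (text.drop i.toNat) kv.1 then kv.2 else best) best) 6
      = (((PySem.List.pyRange 0 (text.length : Int) 1).map
            (fun i => (ks.filter (fun kv => PySem.Chars.startswith (text.drop i.toNat) kv.1)).map (fun kv => kv.2))).flatten).foldl min 6 := by
  rw [List.foldl_flatten, List.foldl_map]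
  congr 1
  funext b i
  exact pv_foldl_if_min _ _ _

lemma pvBest_eq (text : List Char) :
    pvBest text
      = (((PySem.List.pyRange 0 (text.length : Int) 1).map
            (fun i => (pvKeywords.filter (fun kv => PySem.Chars.startswith (text.drop i.toNat) kv.1)).map (fun kv => kv.2))).flatten).foldl min 6 := by
  unfold pvBest
  exact pvBest_eq_gen text pvKeywords

lemma pv_foldl_min_le_init (L : List Nat) (b : Nat) : L.foldl min b ≤ b := by
  induction L generalizing b with
  | nil => exact le_refl b
  | cons x t ih => exact le_trans (ih (min b x)) (Nat.min_le_left _ _)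

lemma pv_foldl_min_le_mem (L : List Nat) (b x : Nat) (h : x ∈ L) : L.foldl min b ≤ x := by
  induction L generalizing b with
  | nil => cases h
  | cons y t ih =>
    rcases List.mem_cons.mp h with rfl | h
    · exact le_trans (pv_foldl_min_le_init t _) (Nat.min_le_right _ _)
    · exact ih _ h

lemma pv_foldl_min_mem_or (L : List Nat) (b : Nat) : L.foldl min b = b ∨ L.foldl min b ∈ L := by
  induction L generalizing b with
  | nil => left; rfl
  | cons y t ih =>
    have hstep : List.foldl min b (y :: t) = List.foldl min (min b y) t := rfl
    rcases ih (min b y) with h | h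
    · rcases Nat.lt_or_ge y b with hlt | hge
      · right; rw [hstep, h]
        have : min b y = y := by omega
        rw [this]; exact List.mem_cons_self
      · left; rw [hstep, h]; omega
    · right; rw [hstep]; exact List.mem_cons_of_mem _ h

lemma pv_kw_ne_nil : ∀ kv ∈ pvKeywords, kv.1 ≠ [] := by decide

-- rank r occurs at some position of the scan ↔ some keyword of rank r is a substring of the text
lemma pv_mem_ranks_iff (text : List Char) (r : Nat) :
    r ∈ (((PySem.List.pyRange 0 (text.length : Int) 1).map
            (fun i => (pvKeywords.filter (fun kv => PySem.Chars.startswith (text.drop i.toNat) kv.1)).map (fun kv => kv.2))).flatten)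
      ↔ pvKeywords.any (fun kv => kv.2 == r && PySem.Chars.isIn kv.1 text) = true := by
  simp only [List.mem_flatten, List.mem_map, List.any_eq_true,
    Bool.and_eq_true, beq_iff_eq, PySem.List.mem_pyRange_one]
  constructor
  · rintro ⟨l, ⟨i, ⟨hi0, hin⟩, rfl⟩, hr⟩
    rw [List.mem_map] at hr
    obtain ⟨kv, hkv, rfl⟩ := hr
    rw [List.mem_filter] at hkv
    exact ⟨kv, hkv.1, rfl, (PySem.Chars.exists_prefix_drop_iff_isIn _ _).mp
      ⟨i.toNat, (PySem.Chars.startswith_iff _ _).mp hkv.2⟩⟩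
  · rintro ⟨kv, hkv, rfl, hisin⟩
    obtain ⟨j, hpre⟩ := (PySem.Chars.exists_prefix_drop_iff_isIn _ _).mpr hisin
    have hjlen : j < text.length := by
      by_contra hge
      rw [List.drop_eq_nil_of_le (by omega)] at hpre
      exact pv_kw_ne_nil kv hkv (List.prefix_nil.mp hpre)
    refine ⟨_, ⟨(j : Int), ⟨by omega, by exact_mod_cast hjlen⟩, rfl⟩, ?_⟩
    refine List.mem_map.mpr ⟨kv, List.mem_filter.mpr ⟨hkv, ?_⟩, rfl⟩
    rw [PySem.Chars.startswith_iff]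
    simpa using hpre

lemma pvBest_le_of_any (text : List Char) (r : Nat)
    (h : pvKeywords.any (fun kv => kv.2 == r && PySem.Chars.isIn kv.1 text) = true) :
    pvBest text ≤ r := by
  rw [pvBest_eq]
  exact pv_foldl_min_le_mem _ _ _ ((pv_mem_ranks_iff text r).mpr h)

lemma pvBest_cases (text : List Char) :
    pvBest text = 6 ∨ pvKeywords.any (fun kv => kv.2 == pvBest text && PySem.Chars.isIn kv.1 text) = true := by
  rcases pv_foldl_min_mem_or
      ((((PySem.List.pyRange 0 (text.length : Int) 1).map
          (fun i => (pvKeywords.filter (fun kv => PySem.Chars.startswith (text.drop i.toNat) kv.1)).map (fun kv => kv.2))).flatten)) 6 with h | h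
  · left; rw [pvBest_eq]; exact h
  · right
    rw [pvBest_eq] at *
    exact (pv_mem_ranks_iff text _).mp h

lemma pvBest_le_six (text : List Char) : pvBest text ≤ 6 := by
  rw [pvBest_eq]; exact pv_foldl_min_le_init _ _

-- the rank-r slice of the keyword dictionary is exactly A's r-th word list
lemma pv_any0 (text : List Char) :
    pvKeywords.any (fun kv => kv.2 == 0 && PySem.Chars.isIn kv.1 text)
      = ["hospital", "medical", "healthcare", "clinic"].any (fun w => PySem.Chars.isIn w.toList text) := by
  simp [pvKeywords]
lemma pv_any1 (text : List Char) :
    pvKeywords.any (fun kv => kv.2 == 1 && PySem.Chars.isIn kv.1 text)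
      = ["bank", "financial", "credit", "investment"].any (fun w => PySem.Chars.isIn w.toList text) := by
  simp [pvKeywords]
lemma pv_any2 (text : List Char) :
    pvKeywords.any (fun kv => kv.2 == 2 && PySem.Chars.isIn kv.1 text)
      = ["retail", "store", "mall", "shop", "restaurant"].any (fun w => PySem.Chars.isIn w.toList text) := by
  simp [pvKeywords]
lemma pv_any3 (text : List Char) :
    pvKeywords.any (fun kv => kv.2 == 3 && PySem.Chars.isIn kv.1 text)
      = ["government", "federal", "state", "municipal"].any (fun w => PySem.Chars.isIn w.toList text) := by
  simp [pvKeywords]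
lemma pv_any4 (text : List Char) :
    pvKeywords.any (fun kv => kv.2 == 4 && PySem.Chars.isIn kv.1 text)
      = ["school", "university", "education", "college"].any (fun w => PySem.Chars.isIn w.toList text) := by
  simp [pvKeywords]
lemma pv_any5 (text : List Char) :
    pvKeywords.any (fun kv => kv.2 == 5 && PySem.Chars.isIn kv.1 text)
      = ["warehouse", "logistics", "distribution"].any (fun w => PySem.Chars.isIn w.toList text) := by
  simp [pvKeywords]

-- ===== VERDICT (by name: the statement is the Claim_ definition above) =====
theorem categorize_client_type_py_spec : Claim_equal_categorize_client_type_py := by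
  intro company_name work_description _
  unfold Spec_categorize_client_type_py categorize_client_type_py categorize_client_type_py_alt
  simp only []
  set text : List Char :=
    (if company_name ≠ "" then PySem.Chars.lower company_name.toList else []) ++
    (if work_description ≠ "" then PySem.Chars.lower work_description.toList else []) with htext
  by_cases h0 : ["hospital", "medical", "healthcare", "clinic"].any (fun w => PySem.Chars.isIn w.toList text) = true
  · have hb : pvBest text = 0 := Nat.le_zero.mp (pvBest_le_of_any text 0 (by rw [pv_any0]; exact h0))
    simp only [h0, hb]
    norm_num [pvCats]
  · by_cases h1 : ["bank", "financial", "credit", "investment"].any (fun w => PySem.Chars.isIn w.toList text) = true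
    · have hle : pvBest text ≤ 1 := pvBest_le_of_any text 1 (by rw [pv_any1]; exact h1)
      have hb : pvBest text = 1 := by
        rcases pvBest_cases text with hc | hc
        · omega
        · have hd : pvBest text = 0 ∨ pvBest text = 1 := by omega
          rcases hd with hv|hv <;> rw [hv] at hc
          · rw [pv_any0] at hc; exact absurd hc h0
          · exact hv
      simp only [h0, h1, hb]
      norm_num [pvCats]
    · by_cases h2 : ["retail", "store", "mall", "shop", "restaurant"].any (fun w => PySem.Chars.isIn w.toList text) = true
      · have hle : pvBest text ≤ 2 := pvBest_le_of_any text 2 (by rw [pv_any2]; exact h2)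
        have hb : pvBest text = 2 := by
          rcases pvBest_cases text with hc | hc
          · omega
          · have hd : pvBest text = 0 ∨ pvBest text = 1 ∨ pvBest text = 2 := by omega
            rcases hd with hv|hv|hv <;> rw [hv] at hc
            · rw [pv_any0] at hc; exact absurd hc h0
            · rw [pv_any1] at hc; exact absurd hc h1
            · exact hv
        simp only [h0, h1, h2, hb]
        norm_num [pvCats]
      · by_cases h3 : ["government", "federal", "state", "municipal"].any (fun w => PySem.Chars.isIn w.toList text) = true
        · have hle : pvBest text ≤ 3 := pvBest_le_of_any text 3 (by rw [pv_any3]; exact h3)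
          have hb : pvBest text = 3 := by
            rcases pvBest_cases text with hc | hc
            · omega
            · have hd : pvBest text = 0 ∨ pvBest text = 1 ∨ pvBest text = 2 ∨ pvBest text = 3 := by omega
              rcases hd with hv|hv|hv|hv <;> rw [hv] at hc
              · rw [pv_any0] at hc; exact absurd hc h0
              · rw [pv_any1] at hc; exact absurd hc h1
              · rw [pv_any2] at hc; exact absurd hc h2
              · exact hv
          simp only [h0, h1, h2, h3, hb]
          norm_num [pvCats]
        · by_cases h4 : ["school", "university", "education", "college"].any (fun w => PySem.Chars.isIn w.toList text) = true
          · have hle : pvBest text ≤ 4 := pvBest_le_of_any text 4 (by rw [pv_any4]; exact h4)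
            have hb : pvBest text = 4 := by
              rcases pvBest_cases text with hc | hc
              · omega
              · have hd : pvBest text = 0 ∨ pvBest text = 1 ∨ pvBest text = 2 ∨ pvBest text = 3 ∨ pvBest text = 4 := by omega
                rcases hd with hv|hv|hv|hv|hv <;> rw [hv] at hc
                · rw [pv_any0] at hc; exact absurd hc h0
                · rw [pv_any1] at hc; exact absurd hc h1
                · rw [pv_any2] at hc; exact absurd hc h2
                · rw [pv_any3] at hc; exact absurd hc h3
                · exact hv
            simp only [h0, h1, h2, h3, h4, hb]
            norm_num [pvCats]
          · by_cases h5 : ["warehouse", "logistics", "distribution"].any (fun w => PySem.Chars.isIn w.toList text) = true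
            · have hle : pvBest text ≤ 5 := pvBest_le_of_any text 5 (by rw [pv_any5]; exact h5)
              have hb : pvBest text = 5 := by
                rcases pvBest_cases text with hc | hc
                · omega
                · have hd : pvBest text = 0 ∨ pvBest text = 1 ∨ pvBest text = 2 ∨ pvBest text = 3 ∨ pvBest text = 4 ∨ pvBest text = 5 := by omega
                  rcases hd with hv|hv|hv|hv|hv|hv <;> rw [hv] at hc
                  · rw [pv_any0] at hc; exact absurd hc h0
                  · rw [pv_any1] at hc; exact absurd hc h1
                  · rw [pv_any2] at hc; exact absurd hc h2
                  · rw [pv_any3] at hc; exact absurd hc h3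
                  · rw [pv_any4] at hc; exact absurd hc h4
                  · exact hv
              simp only [h0, h1, h2, h3, h4, h5, hb]
              norm_num [pvCats]
            · have hb : pvBest text = 6 := by
                rcases pvBest_cases text with hc | hc
                · exact hc
                · have h6 := pvBest_le_six text
                  have hd : pvBest text = 0 ∨ pvBest text = 1 ∨ pvBest text = 2 ∨ pvBest text = 3 ∨ pvBest text = 4 ∨ pvBest text = 5 ∨ pvBest text = 6 := by omega
                  rcases hd with hv|hv|hv|hv|hv|hv|hv <;> rw [hv] at hc
                  · rw [pv_any0] at hc; exact absurd hc h0
                  · rw [pv_any1] at hc; exact absurd hc h1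
                  · rw [pv_any2] at hc; exact absurd hc h2
                  · rw [pv_any3] at hc; exact absurd hc h3
                  · rw [pv_any4] at hc; exact absurd hc h4
                  · rw [pv_any5] at hc; exact absurd hc h5
                  · exact hv
              simp only [h0, h1, h2, h3, h4, h5, hb]
              norm_num
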